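-- pv_equiv track=rewrite | github.com/wzin/DataWipe | backend/services/csv_parser.py | _has_basic_columns
-- ===== SOURCE A (Python) =====
-- from typing import List, Dict, Any, Tuple, Optional
--
-- def _has_basic_columns(columns: List[str]) -> bool:
--     """Check if CSV has basic password manager columns"""
--     required = ['password']
--     identifiers = ['username', 'email', 'login', 'user']
--     urls = ['url', 'website', 'site', 'domain']
--
--     has_password = any(req in col for col in columns for req in required)
--     has_identifier = any(ident in col for col in columns for ident in identifiers)
--     has_url = any(url in col for col in columns for url in urls)
--
--     return has_password and (has_identifier or has_url)
-- ===== SOURCE B (Python) =====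
-- # Category bitmask per keyword.  Keywords subsumed by a shorter one are dropped:
-- # 'username' always contains 'user', and 'website' always contains 'site'.
-- _KEYWORD_BITS = [
--     ('password', 1),
--     ('email', 2), ('login', 2), ('user', 2),
--     ('url', 4), ('site', 4), ('domain', 4),
-- ]
--
-- def _has_basic_columns(columns):
--     """Check if CSV has basic password manager columns (bitmask accumulation)."""
--     mask = 0
--     for col in columns:
--         for kw, bit in _KEYWORD_BITS:
--             if kw in col:
--                 mask |= bit
--         if mask == 7:
--             return True
--     return mask & 1 != 0 and mask & 6 != 0
-- ===== Notes on version B (the rewrite author's own statement) =====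
-- stated objective: faster
-- what changed: Replaces A's three independent any() scans with one pass accumulating a category bitmask over a flat keyword table, with subsumed keywords removed ('username'/'website' dropped because they always contain 'user'/'site') and an early exit once all categories are seen.
import Mathlib
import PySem

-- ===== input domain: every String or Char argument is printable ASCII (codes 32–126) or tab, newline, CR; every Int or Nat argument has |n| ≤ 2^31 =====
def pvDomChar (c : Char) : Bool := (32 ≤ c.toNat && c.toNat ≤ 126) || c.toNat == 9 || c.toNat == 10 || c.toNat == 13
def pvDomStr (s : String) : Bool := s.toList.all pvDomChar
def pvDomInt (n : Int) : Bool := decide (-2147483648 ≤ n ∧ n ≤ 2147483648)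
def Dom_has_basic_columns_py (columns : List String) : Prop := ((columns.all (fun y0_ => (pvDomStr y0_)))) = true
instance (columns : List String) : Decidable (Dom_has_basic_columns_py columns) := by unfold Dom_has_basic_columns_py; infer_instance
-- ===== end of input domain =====

-- B drops A's three any() scans for a single pass accumulating a category bitmask over a
-- flat keyword table (subsumed keywords removed) with early exit; same value everywhere (objective: alternative).

-- ===== PORT A =====
def pvRequired : List String := ["password"]
def pvIdentifiers : List String := ["username", "email", "login", "user"]
def pvUrls : List String := ["url", "website", "site", "domain"]

def has_basic_columns_py (columns : List String) : Bool :=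
  let has_password := columns.any (fun col => pvRequired.any (fun req => PySem.Str.isIn req col))
  let has_identifier := columns.any (fun col => pvIdentifiers.any (fun ident => PySem.Str.isIn ident col))
  let has_url := columns.any (fun col => pvUrls.any (fun url => PySem.Str.isIn url col))
  has_password && (has_identifier || has_url)

-- ===== PORT B =====
def pvKeywordBits : List (String × Nat) :=
  [("password", 1), ("email", 2), ("login", 2), ("user", 2), ("url", 4), ("site", 4), ("domain", 4)]

-- the per-column inner for-loop of Source B
def pvColMask (mask : Nat) (col : String) : Nat :=
  pvKeywordBits.foldl (fun m kb => if PySem.Str.isIn kb.1 col then m ||| kb.2 else m) mask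

-- the outer for-loop of Source B, with the early `return True` when mask == 7
def pvLoop (mask : Nat) : List String → Bool
  | [] => decide (mask &&& 1 ≠ 0) && decide (mask &&& 6 ≠ 0)
  | col :: rest =>
      let m := pvColMask mask col
      if m == 7 then true else pvLoop m rest

def has_basic_columns_py_alt (columns : List String) : Bool :=
  pvLoop 0 columns

-- ===== PRECONDITION & SPEC =====
def Spec_has_basic_columns_py (columns : List String) (out : Bool) : Prop := out = has_basic_columns_py_alt columns
instance (columns : List String) (out : Bool) : Decidable (Spec_has_basic_columns_py columns out) := by unfold Spec_has_basic_columns_py; infer_instance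

-- ===== CLAIM (what is proved, stated in full; the proofs are below) =====
def Claim_equal_has_basic_columns_py : Prop := ∀ (columns : List String), Dom_has_basic_columns_py columns → Spec_has_basic_columns_py columns (has_basic_columns_py columns)

-- ===== LEMMAS AND PROOFS =====

-- abbreviations for the three per-column category predicates, B's reduced keyword sets
def pvP (col : String) : Bool := PySem.Str.isIn "password" col
def pvI (col : String) : Bool :=
  PySem.Str.isIn "email" col || PySem.Str.isIn "login" col || PySem.Str.isIn "user" col
def pvU (col : String) : Bool :=
  PySem.Str.isIn "url" col || PySem.Str.isIn "site" col || PySem.Str.isIn "domain" col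

lemma pvColMask_eq (mask : Nat) (col : String) :
    pvColMask mask col =
      mask ||| ((cond (pvP col) 1 0) ||| (cond (pvI col) 2 0) ||| (cond (pvU col) 4 0)) := by
  simp only [pvColMask, pvKeywordBits, List.foldl, pvP, pvI, pvU]
  cases PySem.Str.isIn "password" col <;> cases PySem.Str.isIn "email" col <;>
    cases PySem.Str.isIn "login" col <;> cases PySem.Str.isIn "user" col <;>
    cases PySem.Str.isIn "url" col <;> cases PySem.Str.isIn "site" col <;>
    cases PySem.Str.isIn "domain" col <;> simp [Nat.or_assoc]

-- the bitmask accumulated over the whole list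
def pvBits (columns : List String) : Nat :=
  (cond (columns.any pvP) 1 0) ||| (cond (columns.any pvI) 2 0) ||| (cond (columns.any pvU) 4 0)

lemma pvBits_lt (columns : List String) : pvBits columns < 8 := by
  unfold pvBits
  cases columns.any pvP <;> cases columns.any pvI <;> cases columns.any pvU <;> decide

lemma pvBits_cons (col : String) (rest : List String) :
    pvBits (col :: rest) =
      ((cond (pvP col) 1 0) ||| (cond (pvI col) 2 0) ||| (cond (pvU col) 4 0)) ||| pvBits rest := by
  simp only [pvBits, List.any_cons]
  cases pvP col <;> cases pvI col <;> cases pvU col <;>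
    cases rest.any pvP <;> cases rest.any pvI <;> cases rest.any pvU <;> rfl

lemma pvIf7 (x r : Nat) (hx : x < 8) (hr : r < 8) :
    (if x == 7 then true
     else (decide ((x ||| r) &&& 1 ≠ 0) && decide ((x ||| r) &&& 6 ≠ 0))) =
      (decide ((x ||| r) &&& 1 ≠ 0) && decide ((x ||| r) &&& 6 ≠ 0)) := by
  interval_cases x <;> interval_cases r <;> rfl

lemma pvLoop_eq (columns : List String) (mask : Nat) (hm : mask < 8) :
    pvLoop mask columns =
      (decide ((mask ||| pvBits columns) &&& 1 ≠ 0) && decide ((mask ||| pvBits columns) &&& 6 ≠ 0)) := by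
  induction columns generalizing mask with
  | nil => simp [pvLoop, pvBits]
  | cons col rest ih =>
    have hbits : (cond (pvP col) 1 0) ||| (cond (pvI col) 2 0) ||| (cond (pvU col) 4 0) < 8 := by
      cases pvP col <;> cases pvI col <;> cases pvU col <;> decide
    have hm' : pvColMask mask col < 8 := by
      rw [pvColMask_eq]; exact Nat.or_lt_two_pow (n := 3) hm hbits
    have hstep : pvLoop mask (col :: rest) =
        (if pvColMask mask col == 7 then true else pvLoop (pvColMask mask col) rest) := rfl
    have hmask : mask ||| pvBits (col :: rest) = pvColMask mask col ||| pvBits rest := by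
      rw [pvBits_cons, pvColMask_eq]; simp [Nat.or_assoc]
    rw [hstep, ih _ hm', hmask]
    exact pvIf7 _ _ hm' (pvBits_lt rest)

-- A's identifier/url keyword lists are equivalent to B's reduced ones:
-- 'username' contains 'user' and 'website' contains 'site'
lemma pvIsIn_trans {a b : String} (col : String) (h : a.toList <:+: b.toList)
    (hb : PySem.Str.isIn b col = true) : PySem.Str.isIn a col = true := by
  rw [PySem.Str.isIn_iff_infix] at hb ⊢
  exact h.trans hb

lemma pvIdent_eq (col : String) :
    pvIdentifiers.any (fun k => PySem.Str.isIn k col) = pvI col := by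
  simp only [pvIdentifiers, pvI, List.any_cons, List.any_nil, Bool.or_false]
  cases h : PySem.Str.isIn "username" col
  · simp [Bool.or_assoc]
  · have hu : PySem.Str.isIn "user" col = true :=
      pvIsIn_trans (a := "user") (b := "username") col (by decide) h
    simp at hu
    simp [hu]

lemma pvUrl_eq (col : String) :
    pvUrls.any (fun k => PySem.Str.isIn k col) = pvU col := by
  simp only [pvUrls, pvU, List.any_cons, List.any_nil, Bool.or_false]
  cases h : PySem.Str.isIn "website" col
  · simp [Bool.or_assoc]
  · have hs : PySem.Str.isIn "site" col = true :=
      pvIsIn_trans (a := "site") (b := "website") col (by decide) h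
    simp at hs
    simp [hs]

-- ===== VERDICT (by name: the statement is the Claim_ definition above) =====
theorem has_basic_columns_py_spec : Claim_equal_has_basic_columns_py := by
  intro columns _
  unfold Spec_has_basic_columns_py has_basic_columns_py has_basic_columns_py_alt
  rw [pvLoop_eq columns 0 (by omega)]
  have hreq : (fun col => pvRequired.any fun req => PySem.Str.isIn req col) = pvP := by
    funext col; simp [pvRequired, pvP]
  have hid : (fun col => pvIdentifiers.any fun k => PySem.Str.isIn k col) = pvI := by
    funext col; exact pvIdent_eq col
  have hurl : (fun col => pvUrls.any fun k => PySem.Str.isIn k col) = pvU := by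
    funext col; exact pvUrl_eq col
  simp only [hreq, hid, hurl, pvBits, Nat.zero_or]
  cases columns.any pvP <;> cases columns.any pvI <;> cases columns.any pvU <;> rfl
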